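-- pv_equiv track=rewrite | github.com/mikecirioli/thingino-roku-viewer | server/geotag_manager.py | cluster_photos_by_time
-- ===== SOURCE A (Python) =====
-- from typing import Optional, Dict, List, Tuple
--
-- def cluster_photos_by_time(photos_with_timestamps: List[Tuple[str, Optional[int]]],
--                           time_window: int = 3600) -> List[List[Tuple[str, int]]]:
--     """
--     Cluster photos by timestamp
--
--     Args:
--         photos_with_timestamps: List of (filename, timestamp) tuples
--         time_window: Maximum seconds between photos in same cluster (default: 1 hour)
--
--     Returns:
--         List of clusters, each containing photos taken within time_window
--     """
--     # Filter out photos without timestamps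
--     photos = [(f, t) for f, t in photos_with_timestamps if t is not None]
--
--     if not photos:
--         return []
--
--     # Sort by timestamp
--     photos.sort(key=lambda x: x[1])
--
--     clusters = []
--     current_cluster = [photos[0]]
--
--     for filename, timestamp in photos[1:]:
--         time_delta = timestamp - current_cluster[-1][1]
--
--         if time_delta <= time_window:
--             current_cluster.append((filename, timestamp))
--         else:
--             clusters.append(current_cluster)
--             current_cluster = [(filename, timestamp)]
--
--     if current_cluster:
--         clusters.append(current_cluster)
--
--     return clusters
-- ===== SOURCE B (Python) =====
-- from typing import Optional, List, Tuple
--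
-- def cluster_photos_by_time(photos_with_timestamps: List[Tuple[str, Optional[int]]],
--                           time_window: int = 3600) -> List[List[Tuple[str, int]]]:
--     # Same filtering and stable sort as the original, then: one pass over
--     # consecutive pairs collects the cut points (indices where the gap exceeds
--     # time_window); the clusters are the slices between successive cut points.
--     photos = sorted([(f, t) for f, t in photos_with_timestamps if t is not None],
--                     key=lambda x: x[1])
--     if not photos:
--         return []
--     cuts = [i + 1 for i, (p, q) in enumerate(zip(photos, photos[1:]))
--             if q[1] - p[1] > time_window]
--     bounds = [0] + cuts + [len(photos)]
--     return [photos[a:b] for a, b in zip(bounds, bounds[1:])]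
-- ===== Notes on version B (the rewrite author's own statement) =====
-- stated objective: alternative
-- what changed: The accumulator loop that grows a current cluster and flushes it on a large gap is replaced by a cut-point decomposition: one pairwise pass records the indices where consecutive sorted timestamps differ by more than time_window, and the clusters are produced by slicing the sorted list between successive cut points.
import Mathlib
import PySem

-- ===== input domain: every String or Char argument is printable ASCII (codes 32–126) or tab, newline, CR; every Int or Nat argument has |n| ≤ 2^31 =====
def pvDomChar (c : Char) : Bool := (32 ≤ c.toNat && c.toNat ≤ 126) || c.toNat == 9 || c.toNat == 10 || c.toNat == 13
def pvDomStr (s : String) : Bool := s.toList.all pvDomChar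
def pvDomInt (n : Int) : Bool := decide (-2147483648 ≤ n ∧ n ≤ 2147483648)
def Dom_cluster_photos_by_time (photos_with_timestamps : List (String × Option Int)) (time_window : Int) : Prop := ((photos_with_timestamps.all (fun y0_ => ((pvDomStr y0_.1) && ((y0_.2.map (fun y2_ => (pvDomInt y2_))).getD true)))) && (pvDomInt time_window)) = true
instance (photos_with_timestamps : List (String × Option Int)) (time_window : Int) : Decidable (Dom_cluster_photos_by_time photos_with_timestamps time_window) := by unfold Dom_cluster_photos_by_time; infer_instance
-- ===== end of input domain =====

-- B replaces A's accumulator loop by a cut-point decomposition (pairwise gap scan, then slicing); same cost, different structure.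


-- ===== PORT A =====
-- Transliteration of A: filter out None timestamps, stable sort by timestamp,
-- then a fold carrying (clusters, current_cluster); current_cluster[-1] is read
-- with pyGetD (the default ("", 0) is never used: current_cluster is nonempty there).
def cluster_photos_by_time (photos_with_timestamps : List (String × Option Int)) (time_window : Int) : List (List (String × Int)) :=
  let photos := PySem.List.sorted
    (photos_with_timestamps.filterMap (fun p => p.2.map (fun t => (p.1, t))))
    (fun x => x.2) false
  if photos.isEmpty then []
  else
    let st := (PySem.List.slice photos (some 1) none).foldl
      (fun (st : List (List (String × Int)) × List (String × Int)) pr =>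
        if pr.2 - (PySem.List.pyGetD st.2 (-1) ("", 0)).2 ≤ time_window
        then (st.1, st.2 ++ [pr])
        else (st.1 ++ [st.2], [pr]))
      ([], [PySem.List.pyGetD photos 0 ("", 0)])
    if st.2.isEmpty then st.1 else st.1 ++ [st.2]

-- ===== PORT B =====
-- Transliteration of B (Source B): same filter + stable sort, then cut points from a
-- pairwise pass (enumerate over zip(photos, photos[1:])) and slicing between bounds.
def cluster_photos_by_time_alt (photos_with_timestamps : List (String × Option Int)) (time_window : Int) : List (List (String × Int)) :=
  let photos := PySem.List.sorted
    (photos_with_timestamps.filterMap (fun p => p.2.map (fun t => (p.1, t))))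
    (fun x => x.2) false
  if photos.isEmpty then []
  else
    let cuts : List Int := (PySem.List.enumerate (photos.zip (PySem.List.slice photos (some 1) none)) 0).filterMap
      (fun ip => if ip.2.2.2 - ip.2.1.2 > time_window then some (ip.1 + 1) else none)
    let bounds : List Int := [0] ++ cuts ++ [(photos.length : Int)]
    (bounds.zip (PySem.List.slice bounds (some 1) none)).map
      (fun ab => PySem.List.slice photos (some ab.1) (some ab.2))

-- ===== PRECONDITION & SPEC =====
def Spec_cluster_photos_by_time (photos_with_timestamps : List (String × Option Int)) (time_window : Int) (out : List (List (String × Int))) : Prop := out = cluster_photos_by_time_alt photos_with_timestamps time_window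
instance (photos_with_timestamps : List (String × Option Int)) (time_window : Int) (out : List (List (String × Int))) : Decidable (Spec_cluster_photos_by_time photos_with_timestamps time_window out) := by unfold Spec_cluster_photos_by_time; infer_instance

-- ===== CLAIM (what is proved, stated in full; the proofs are below) =====
def Claim_equal_cluster_photos_by_time : Prop := ∀ (photos_with_timestamps : List (String × Option Int)) (time_window : Int), Dom_cluster_photos_by_time photos_with_timestamps time_window → Spec_cluster_photos_by_time photos_with_timestamps time_window (cluster_photos_by_time photos_with_timestamps time_window)

-- ===== LEMMAS AND PROOFS =====

-- Canonical recursive chunking: pvSplit w p l = (longest prefix of l chained to p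
-- by gaps ≤ w, the remainder); pvChunks groups a list into its gap-≤-w runs.
def pvSplit (w : Int) (p : String × Int) : List (String × Int) → List (String × Int) × List (String × Int)
  | [] => ([], [])
  | q :: rs =>
    if q.2 - p.2 ≤ w then ((q :: (pvSplit w q rs).1), (pvSplit w q rs).2)
    else ([], q :: rs)

theorem pvSplit_snd_le (w : Int) (p : String × Int) (l : List (String × Int)) :
    (pvSplit w p l).2.length ≤ l.length := by
  induction l generalizing p with
  | nil => simp [pvSplit]
  | cons q rs ih =>
    simp only [pvSplit]
    split
    · exact Nat.le_succ_of_le (ih q)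
    · simp

def pvChunks (w : Int) : List (String × Int) → List (List (String × Int))
  | [] => []
  | p :: rest => (p :: (pvSplit w p rest).1) :: pvChunks w (pvSplit w p rest).2
termination_by l => l.length
decreasing_by
  exact Nat.lt_succ_of_le (pvSplit_snd_le _ _ _)

theorem pvSplit_append (w : Int) (p : String × Int) (l : List (String × Int)) :
    (pvSplit w p l).1 ++ (pvSplit w p l).2 = l := by
  induction l generalizing p with
  | nil => simp [pvSplit]
  | cons q rs ih =>
    simp only [pvSplit]
    split
    · simpa using ih q
    · simp

-- ---- A side ----
def pvStepA (w : Int) (st : List (List (String × Int)) × List (String × Int)) (pr : String × Int) :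
    List (List (String × Int)) × List (String × Int) :=
  if pr.2 - (PySem.List.pyGetD st.2 (-1) ("", 0)).2 ≤ w
  then (st.1, st.2 ++ [pr])
  else (st.1 ++ [st.2], [pr])

def pvFinish (st : List (List (String × Int)) × List (String × Int)) : List (List (String × Int)) :=
  if st.2.isEmpty then st.1 else st.1 ++ [st.2]

theorem pvGetD_last (pre : List (String × Int)) (p d : String × Int) :
    PySem.List.pyGetD (pre ++ [p]) (-1) d = p := by
  simp [PySem.List.pyGetD, PySem.List.pyGet?, PySem.List.pyIdx?]

theorem pvFoldA_shift (w : Int) (rest : List (String × Int))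
    (acc : List (List (String × Int))) (cur : List (String × Int)) :
    rest.foldl (pvStepA w) (acc, cur)
      = (acc ++ (rest.foldl (pvStepA w) ([], cur)).1, (rest.foldl (pvStepA w) ([], cur)).2) := by
  induction rest generalizing acc cur with
  | nil => simp
  | cons q rs ih =>
    simp only [List.foldl_cons, pvStepA]
    split
    · exact ih acc (cur ++ [q])
    · simp only [List.nil_append]
      rw [ih (acc ++ [cur]) [q], ih [cur] [q]]
      simp

theorem pvFinish_append (a : List (List (String × Int)))
    (st : List (List (String × Int)) × List (String × Int)) :
    pvFinish (a ++ st.1, st.2) = a ++ pvFinish st := by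
  simp only [pvFinish]
  split <;> simp

theorem pvFoldA_main (w : Int) (rest pre : List (String × Int)) (p : String × Int) :
    pvFinish (rest.foldl (pvStepA w) ([], pre ++ [p]))
      = (pre ++ [p] ++ (pvSplit w p rest).1) :: pvChunks w (pvSplit w p rest).2 := by
  induction rest generalizing pre p with
  | nil => simp [pvSplit, pvChunks, pvFinish]
  | cons q rs ih =>
    simp only [List.foldl_cons, pvStepA, pvGetD_last, pvSplit]
    split
    · have h := ih (pre ++ [p]) q
      simp only [List.append_assoc] at h ⊢
      simpa using h
    · rw [pvFoldA_shift]
      have h2 := ih [] q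
      simp only [List.nil_append] at h2 ⊢
      rw [pvFinish_append [pre ++ [p]] (rs.foldl (pvStepA w) ([], [q])), h2]
      simp [pvChunks]

theorem pvA_eq_chunks (w : Int) (photos : List (String × Int)) :
    (if photos.isEmpty then []
     else
      let st := (PySem.List.slice photos (some 1) none).foldl (pvStepA w)
        ([], [PySem.List.pyGetD photos 0 ("", 0)])
      if st.2.isEmpty then st.1 else st.1 ++ [st.2])
      = pvChunks w photos := by
  cases photos with
  | nil => simp [pvChunks]
  | cons p rest =>
    have hget : PySem.List.pyGetD (p :: rest) 0 ("", 0) = p := by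
      simp [PySem.List.pyGetD, PySem.List.pyGet?, PySem.List.pyIdx?]
    have h := pvFoldA_main w rest [] p
    simp only [List.nil_append] at h
    simp only [List.isEmpty_cons, PySem.List.slice_from_one, List.tail_cons, Bool.false_eq_true,
      if_false, hget]
    show pvFinish (rest.foldl (pvStepA w) ([], [p])) = _
    rw [h]
    conv_rhs => rw [pvChunks]
    simp

-- ---- B side ----
def pvCutsN (w : Int) : List (String × Int) → List Nat
  | x :: y :: t => (if y.2 - x.2 > w then [1] else []) ++ (pvCutsN w (y :: t)).map (· + 1)
  | _ => []

theorem pvEnum_shift (zs : List ((String × Int) × (String × Int))) (s : Int) :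
    PySem.List.enumerate zs s = (PySem.List.enumerate zs 0).map (fun ip => (ip.1 + s, ip.2)) := by
  induction zs generalizing s with
  | nil => rfl
  | cons z t ih =>
    show (s, z) :: PySem.List.enumerate t (s + 1) = _
    rw [ih (s + 1)]
    show _ = (0 + s, z) :: (PySem.List.enumerate t 1).map _
    rw [ih 1]
    simp [Function.comp, add_comm, add_left_comm]

theorem pvCuts_eq (w : Int) (xs : List (String × Int)) :
    ((PySem.List.enumerate (xs.zip xs.tail) 0).filterMap
      (fun ip => if ip.2.2.2 - ip.2.1.2 > w then some (ip.1 + 1) else none))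
      = (pvCutsN w xs).map (fun k : Nat => (k : Int)) := by
  match xs with
  | [] => rfl
  | [x] => rfl
  | x :: y :: t =>
    have ih := pvCuts_eq w (y :: t)
    have hcast : ((pvCutsN w (y :: t)).map (fun x => x + 1)).map (fun k : Nat => (k : Int))
        = ((pvCutsN w (y :: t)).map (fun k : Nat => (k : Int))).map (fun z => z + 1) := by
      simp [List.map_map, Function.comp_def]
    have hdef : pvCutsN w (x :: y :: t)
        = (if y.2 - x.2 > w then [1] else []) ++ (pvCutsN w (y :: t)).map (· + 1) := rfl
    show List.filterMap _ ((0, (x, y)) :: PySem.List.enumerate ((y :: t).zip (y :: t).tail) 1) = _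
    rw [pvEnum_shift _ 1, List.filterMap_cons]
    simp only [List.filterMap_map]
    have hmap : (List.filterMap
        ((fun ip => if ip.2.2.2 - ip.2.1.2 > w then some (ip.1 + 1) else none) ∘
          (fun ip : Int × ((String × Int) × (String × Int)) => (ip.1 + 1, ip.2)))
        (PySem.List.enumerate ((y :: t).zip (y :: t).tail) 0))
        = (List.filterMap (fun ip => if ip.2.2.2 - ip.2.1.2 > w then some (ip.1 + 1) else none)
            (PySem.List.enumerate ((y :: t).zip (y :: t).tail) 0)).map (fun z => z + 1) := by
      rw [List.map_filterMap]
      apply List.filterMap_congr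
      intro a _
      by_cases h : a.2.2.2 - a.2.1.2 > w <;> simp [h, Function.comp]
    rw [hmap, ih, hdef]
    have htailmap : List.map ((fun z : Int => z + 1) ∘ fun k : Nat => (k : Int)) (pvCutsN w (y :: t))
        = List.map (fun k : Nat => (k : Int)) ((pvCutsN w (y :: t)).map (· + 1)) := by
      simp only [List.map_map]
      apply List.map_congr_left
      intro k _
      simp
    by_cases h : y.2 - x.2 > w
    · simp only [if_pos h, List.map_map, List.map_append]
      rw [htailmap]
      norm_num
    · simp only [if_neg h, List.map_map, List.nil_append]
      rw [htailmap]
      simp [List.map_map]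

def pvSlices (photos : List (String × Int)) (bs : List Nat) : List (List (String × Int)) :=
  (bs.zip bs.tail).map (fun ab => (photos.drop ab.1).take (ab.2 - ab.1))

theorem pvCuts_split (w : Int) (rest : List (String × Int)) (p : String × Int) :
    pvCutsN w (p :: rest)
      = (match (pvSplit w p rest).2 with
         | [] => []
         | _ :: _ => ((pvSplit w p rest).1.length + 1)
              :: (pvCutsN w (pvSplit w p rest).2).map (· + ((pvSplit w p rest).1.length + 1))) := by
  induction rest generalizing p with
  | nil => simp [pvSplit, pvCutsN]
  | cons q rs ih =>
    by_cases h : q.2 - p.2 ≤ w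
    · have hc : ¬ (q.2 - p.2 > w) := by omega
      have ihq := ih q
      simp only [pvSplit, if_pos h]
      cases hs : (pvSplit w q rs).2 with
      | nil =>
        simp only [pvCutsN, if_neg hc, List.nil_append]
        rw [ihq]
        simp [hs]
      | cons b bs =>
        simp only [pvCutsN, if_neg hc, List.nil_append]
        rw [ihq]
        simp only [hs, List.map_cons, List.map_map, List.length_cons]
        refine List.cons_eq_cons.mpr ⟨by omega, List.map_congr_left ?_⟩
        intro a _
        simp only [Function.comp_apply]
        omega
    · have hc : q.2 - p.2 > w := by omega
      simp only [pvSplit, if_neg h, pvCutsN, if_pos hc]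
      simp

theorem pvSlices_split (w : Int) (n : Nat) : ∀ (xs : List (String × Int)), xs.length ≤ n → xs ≠ [] →
    pvSlices xs (0 :: (pvCutsN w xs ++ [xs.length])) = pvChunks w xs := by
  induction n with
  | zero => intro xs h hne; cases xs <;> simp_all
  | succ n ih =>
    intro xs hlen hne
    match xs with
    | p :: rest =>
      have hsplit := pvSplit_append w p rest
      have hcuts := pvCuts_split w rest p
      cases hb : (pvSplit w p rest).2 with
      | nil =>
        have h' := hsplit
        rw [hb] at h'
        have ha : (pvSplit w p rest).1 = rest := by simpa using h'
        have hS : pvSlices (p :: rest) (0 :: (([] : List Nat) ++ [(p :: rest).length]))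
            = [p :: rest] := by
          simp [pvSlices]
        rw [hcuts, hb, hS]
        conv_rhs => rw [pvChunks]
        rw [hb, ha]
        simp [pvChunks]
      | cons b bs =>
        have hblen : (b :: bs).length ≤ n := by
          have h1 := pvSplit_snd_le w p rest
          rw [hb] at h1
          simp only [List.length_cons] at hlen h1 ⊢
          omega
        have ihb := ih (b :: bs) hblen (by simp)
        set a := (pvSplit w p rest).1 with hadef
        set c := a.length + 1 with hc
        have h' := hsplit
        rw [hb] at h'
        have hxs : p :: rest = (p :: a) ++ (b :: bs) := by
          conv_lhs => rw [← h']
          simp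
        have hlenpa : (p :: a).length = c := by simp [hc]
        have hlenx : (p :: rest).length = (b :: bs).length + c := by
          rw [hxs]; simp [hc]; omega
        set L : List Nat := pvCutsN w (b :: bs) ++ [(b :: bs).length] with hL
        have hbounds : (pvCutsN w (b :: bs)).map (· + c) ++ [(p :: rest).length]
            = L.map (· + c) := by
          rw [hL, List.map_append, hlenx]
          simp
        rw [hcuts, hb]
        simp only [pvSlices, List.cons_append]
        rw [hbounds]
        -- 0 :: c :: L.map (·+c) = 0 :: (0 :: L).map (·+c)
        have hcons : (c :: L.map (· + c)) = (0 :: L).map (· + c) := by simp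
        rw [hcons]
        -- unfold one zip step, then push the (+c)-shift through zip
        have hzip : ((0 :: (0 :: L).map (· + c)).zip ((0 :: L).map (· + c)))
            = (0, c) :: ((0 :: L).zip (0 :: L).tail).map (Prod.map (· + c) (· + c)) := by
          have h1 : (0 :: L).map (· + c) = c :: L.map (· + c) := by simp
          simp only [List.tail_cons]
          rw [← List.zip_map, h1]
          simp [List.zip_cons_cons]
        simp only [List.tail_cons]
        rw [hzip]
        simp only [List.map_cons, List.map_map]
        have hhead : List.take (c - 0) (List.drop 0 (p :: rest)) = p :: a := by
          rw [hxs]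
          simp only [Nat.sub_zero, List.drop_zero, ← hlenpa, List.take_left]
        have htail : ∀ ab : Nat × Nat,
            ((fun ab : Nat × Nat => List.take (ab.2 - ab.1) (List.drop ab.1 (p :: rest))) ∘
              Prod.map (· + c) (· + c)) ab
            = List.take (ab.2 - ab.1) (List.drop ab.1 (b :: bs)) := by
          intro ab
          obtain ⟨u, v⟩ := ab
          show List.take ((v + c) - (u + c)) (List.drop (u + c) (p :: rest))
              = List.take (v - u) (List.drop u (b :: bs))
          rw [hxs]
          have hd : List.drop (u + c) ((p :: a) ++ (b :: bs)) = List.drop u (b :: bs) := by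
            rw [List.cons_append, show u + c = (a.length + u) + 1 from by omega,
              List.drop_succ_cons]
            simp
          rw [hd, Nat.add_sub_add_right]
        rw [hhead, List.map_congr_left (fun ab _ => htail ab)]
        have : (((0 :: L).zip (0 :: L).tail).map
            (fun ab : Nat × Nat => List.take (ab.2 - ab.1) (List.drop ab.1 (b :: bs))))
            = pvChunks w (b :: bs) := by
          rw [← ihb]; rfl
        rw [this]
        conv_rhs => rw [pvChunks]
        rw [hb, ← hadef]
    | [] => exact absurd rfl hne

theorem pvB_eq_chunks (w : Int) (photos : List (String × Int)) :
    (if photos.isEmpty then []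
     else
      let cuts : List Int := (PySem.List.enumerate (photos.zip (PySem.List.slice photos (some 1) none)) 0).filterMap
        (fun ip => if ip.2.2.2 - ip.2.1.2 > w then some (ip.1 + 1) else none)
      let bounds : List Int := [0] ++ cuts ++ [(photos.length : Int)]
      (bounds.zip (PySem.List.slice bounds (some 1) none)).map
        (fun ab => PySem.List.slice photos (some ab.1) (some ab.2)))
      = pvChunks w photos := by
  cases hp : photos with
  | nil => simp [pvChunks]
  | cons p rest =>
    simp only [List.isEmpty_cons, Bool.false_eq_true, if_false, PySem.List.slice_from_one,
      List.tail_cons]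
    have hcuts := pvCuts_eq w (p :: rest)
    simp only [List.tail_cons] at hcuts
    rw [hcuts]
    have hbounds : [(0 : Int)] ++ (pvCutsN w (p :: rest)).map (fun k : Nat => (k : Int))
          ++ [((p :: rest).length : Int)]
        = (0 :: (pvCutsN w (p :: rest) ++ [(p :: rest).length])).map (fun k : Nat => (k : Int)) := by
      simp
    rw [hbounds, ← List.map_tail, List.zip_map, List.map_map]
    have hpt : ∀ ab : Nat × Nat,
        ((fun ab : Int × Int => PySem.List.slice (p :: rest) (some ab.1) (some ab.2)) ∘
          Prod.map (fun k : Nat => (k : Int)) (fun k : Nat => (k : Int))) ab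
        = List.take (ab.2 - ab.1) (List.drop ab.1 (p :: rest)) := by
      intro ab
      simp only [Function.comp_apply]
      exact PySem.List.slice_natCast (p :: rest) ab.1 ab.2
    rw [List.map_congr_left (fun ab _ => hpt ab)]
    exact pvSlices_split w (p :: rest).length (p :: rest) le_rfl (by simp)

-- ===== VERDICT (by name: the statement is the Claim_ definition above) =====
theorem cluster_photos_by_time_spec : Claim_equal_cluster_photos_by_time := by
  intro pw w _
  show cluster_photos_by_time pw w = cluster_photos_by_time_alt pw w
  exact (pvA_eq_chunks w _).trans (pvB_eq_chunks w _).symm
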